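-- pv_equiv track=rewrite | github.com/HALOCORE/TransMap | data/transmap/codemap/cm_srcmapping.py | _seperate_numeric_annos_and_codelines
-- ===== SOURCE A (Python) =====
-- def _seperate_annos_and_codelines(s, seperator, assert_seperator):
--   raw_code_lines = s.split("\n")
--   lines_with_annos = []
--   for i, line in enumerate(raw_code_lines):
--     if assert_seperator in line:
--       assert seperator in line, f"line {i} ({line}) does not contain seperator {seperator}"
--       code, anno = line.split(seperator)
--       lines_with_annos.append((code, anno))
--     else:
--       lines_with_annos.append((line, None))
--   return lines_with_annos, "\n".join([line for line, _ in lines_with_annos])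
--
-- def _seperate_numeric_annos_and_codelines(s, comment_prefix):
--   anno_first_sep = comment_prefix + " --- py stmt "
--   lines_with_annos, code = _seperate_annos_and_codelines(s, "   " + anno_first_sep, "--- py")
--   new_lines_with_annos = []
--   for line, idx in lines_with_annos:
--     if idx is None:
--       new_lines_with_annos.append((line, None))
--     else:
--       idxs = tuple(int(i) for i in idx.split(", py stmt "))
--       new_lines_with_annos.append((line, idxs))
--   return new_lines_with_annos, code
-- ===== SOURCE B (Python) =====
-- def _seperate_numeric_annos_and_codelines(s, comment_prefix):
--   sep = "   " + comment_prefix + " --- py stmt "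
--   pairs = []
--   codes = []
--   for line in s.split("\n"):
--     if sep in line:
--       parts = line.split(sep)
--       code = parts[0]
--       idxs = tuple(int(x) for x in parts[1].split(", py stmt "))
--       pairs.append((code, idxs))
--       codes.append(code)
--     else:
--       pairs.append((line, None))
--       codes.append(line)
--   return pairs, "\n".join(codes)
-- ===== Notes on version B (the rewrite author's own statement) =====
-- stated objective: simpler
-- what changed: Inlines the generic two-pass helper into a single pass over the lines: one loop with two accumulators branches directly on the full separator, parses the numeric annotation immediately, and collects the code parts for the join, removing the intermediate string-annotation pair list that A builds and re-scans twice.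
import Mathlib
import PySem

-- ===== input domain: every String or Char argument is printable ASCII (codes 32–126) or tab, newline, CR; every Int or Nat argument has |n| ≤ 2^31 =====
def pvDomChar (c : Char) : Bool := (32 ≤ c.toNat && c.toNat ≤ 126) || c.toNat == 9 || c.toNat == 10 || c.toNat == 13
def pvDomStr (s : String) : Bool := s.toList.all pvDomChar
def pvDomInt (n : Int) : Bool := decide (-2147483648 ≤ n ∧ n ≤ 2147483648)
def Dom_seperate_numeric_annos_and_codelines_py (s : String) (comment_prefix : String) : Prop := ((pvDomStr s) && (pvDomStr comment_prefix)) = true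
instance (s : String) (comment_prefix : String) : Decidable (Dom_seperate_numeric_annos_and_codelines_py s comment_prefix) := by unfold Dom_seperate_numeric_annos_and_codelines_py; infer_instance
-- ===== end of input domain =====

-- B fuses A's helper + second pass into ONE pass with two accumulators, branching on the full
-- separator (simpler decomposition; equivalence of the return value on all non-raising inputs).

-- ===== PORT A =====
-- helper _seperate_annos_and_codelines, transliterated on List Char (PySem.Chars = Python str semantics)
def pvSepAnnos (s seperator assert_seperator : List Char) :
    (List (List Char × Option (List Char))) × List Char :=
  let raw_code_lines := (PySem.Chars.split? s "\n".toList).getD []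
  let lines_with_annos := raw_code_lines.foldl (fun acc line =>
    if PySem.Chars.isIn assert_seperator line then
      if PySem.Chars.isIn seperator line then
        match (PySem.Chars.split? line seperator).getD [] with
        | [code, anno] => acc ++ [(code, some anno)]
        | _ => acc ++ [(line, none)]      -- Python: ValueError on 2-tuple unpack; excluded by Pre_
      else acc ++ [(line, none)]          -- Python: AssertionError; excluded by Pre_
    else acc ++ [(line, none)]) []
  (lines_with_annos, PySem.Chars.join "\n".toList (lines_with_annos.map Prod.fst))

def seperate_numeric_annos_and_codelines_py (s : String) (comment_prefix : String) :
    (List (String × Option (List Int))) × String :=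
  let anno_first_sep := comment_prefix.toList ++ " --- py stmt ".toList
  let res := pvSepAnnos s.toList ("   ".toList ++ anno_first_sep) "--- py".toList
  let new_lines_with_annos := res.1.foldl (fun acc la =>
    match la.2 with
    | none => acc ++ [(String.ofList la.1, (none : Option (List Int)))]
    | some idx => acc ++ [(String.ofList la.1,
        some (((PySem.Chars.split? idx ", py stmt ".toList).getD []).map
          (fun t => (PySem.Int.ofChars? t).getD 0)))]) []   -- int(i); ValueError excluded by Pre_
  (new_lines_with_annos, String.ofList res.2)

-- ===== PORT B =====
def seperate_numeric_annos_and_codelines_py_alt (s : String) (comment_prefix : String) :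
    (List (String × Option (List Int))) × String :=
  let sep := "   ".toList ++ comment_prefix.toList ++ " --- py stmt ".toList
  let lines := (PySem.Chars.split? s.toList "\n".toList).getD []
  let r := lines.foldl (fun acc line =>
    if PySem.Chars.isIn sep line then
      let parts := (PySem.Chars.split? line sep).getD []
      let code := parts.getD 0 []
      let idxs := ((PySem.Chars.split? (parts.getD 1 []) ", py stmt ".toList).getD []).map
        (fun t => (PySem.Int.ofChars? t).getD 0)
      (acc.1 ++ [(String.ofList code, some idxs)], acc.2 ++ [code])
    else (acc.1 ++ [(String.ofList line, (none : Option (List Int)))], acc.2 ++ [line]))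
    (([] : List (String × Option (List Int))), ([] : List (List Char)))
  (r.1, String.ofList (PySem.Chars.join "\n".toList r.2))

-- ===== PRECONDITION & SPEC =====
-- Pre_ excludes exactly the inputs on which Python A raises: a line containing "--- py" must
-- contain the full separator exactly once (else AssertionError / unpack ValueError) and every
-- piece of its annotation must be int()-parseable (else ValueError).
def Pre_seperate_numeric_annos_and_codelines_py (s : String) (comment_prefix : String) : Prop :=
  ∀ line ∈ (PySem.Chars.split? s.toList "\n".toList).getD [],
    PySem.Chars.isIn "--- py".toList line = true →
      (PySem.Chars.isIn ("   ".toList ++ comment_prefix.toList ++ " --- py stmt ".toList) line = true ∧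
       ((PySem.Chars.split? line ("   ".toList ++ comment_prefix.toList ++ " --- py stmt ".toList)).getD []).length = 2 ∧
       ∀ t ∈ (PySem.Chars.split?
                (((PySem.Chars.split? line ("   ".toList ++ comment_prefix.toList ++ " --- py stmt ".toList)).getD []).getD 1 [])
                ", py stmt ".toList).getD [],
         (PySem.Int.ofChars? t).isSome = true)
instance (s : String) (comment_prefix : String) :
    Decidable (Pre_seperate_numeric_annos_and_codelines_py s comment_prefix) := by
  unfold Pre_seperate_numeric_annos_and_codelines_py; infer_instance
def pvWitness_seperate_numeric_annos_and_codelines_py : String × String :=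
  ("x = 1   # --- py stmt 0\ny = 2", "#")

-- (Spec below)
def Spec_seperate_numeric_annos_and_codelines_py (s : String) (comment_prefix : String) (out : (List (String × Option (List Int))) × String) : Prop := out = seperate_numeric_annos_and_codelines_py_alt s comment_prefix
instance (s : String) (comment_prefix : String) (out : (List (String × Option (List Int))) × String) : Decidable (Spec_seperate_numeric_annos_and_codelines_py s comment_prefix out) := by unfold Spec_seperate_numeric_annos_and_codelines_py; infer_instance

-- ===== CLAIM (what is proved, stated in full; the proofs are below) =====
def Claim_equal_seperate_numeric_annos_and_codelines_py : Prop := ∀ (s : String) (comment_prefix : String), Dom_seperate_numeric_annos_and_codelines_py s comment_prefix → Pre_seperate_numeric_annos_and_codelines_py s comment_prefix → Spec_seperate_numeric_annos_and_codelines_py s comment_prefix (seperate_numeric_annos_and_codelines_py s comment_prefix)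

-- ===== LEMMAS AND PROOFS =====

-- abbreviations for the constant pieces and the per-line result functions
def pvMark : List Char := "--- py".toList
def pvSep (cp : String) : List Char := "   ".toList ++ cp.toList ++ " --- py stmt ".toList
def pvParse (cs : List Char) : List Int :=
  ((PySem.Chars.split? cs ", py stmt ".toList).getD []).map (fun t => (PySem.Int.ofChars? t).getD 0)
-- per-line value of A's first pass
def pvFA (cp : String) (line : List Char) : List Char × Option (List Char) :=
  if PySem.Chars.isIn pvMark line then
    if PySem.Chars.isIn (pvSep cp) line then
      match (PySem.Chars.split? line (pvSep cp)).getD [] with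
      | [code, anno] => (code, some anno)
      | _ => (line, none)
    else (line, none)
  else (line, none)
-- per-line value of A's second pass
def pvGA (p : List Char × Option (List Char)) : String × Option (List Int) :=
  match p.2 with
  | none => (String.ofList p.1, none)
  | some idx => (String.ofList p.1, some (pvParse idx))
-- per-line pair and code part of B
def pvPB (cp : String) (line : List Char) : String × Option (List Int) :=
  if PySem.Chars.isIn (pvSep cp) line then
    (String.ofList (((PySem.Chars.split? line (pvSep cp)).getD []).getD 0 []),
     some (pvParse (((PySem.Chars.split? line (pvSep cp)).getD []).getD 1 [])))
  else (String.ofList line, none)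
def pvCB (cp : String) (line : List Char) : List Char :=
  if PySem.Chars.isIn (pvSep cp) line then ((PySem.Chars.split? line (pvSep cp)).getD []).getD 0 []
  else line

lemma pvMark_of_sep (cp : String) (line : List Char)
    (h : PySem.Chars.isIn (pvSep cp) line = true) : PySem.Chars.isIn pvMark line = true := by
  rw [PySem.Chars.isIn_iff_infix] at h ⊢
  refine List.IsInfix.trans ?_ h
  refine List.IsInfix.trans (l₂ := " --- py stmt ".toList) (by decide) ?_
  exact (List.suffix_append ("   ".toList ++ cp.toList) _).isInfix

lemma pvA_eq (s cp : String) :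
    seperate_numeric_annos_and_codelines_py s cp =
      ((((PySem.Chars.split? s.toList "\n".toList).getD []).map (fun l => pvGA (pvFA cp l))),
       String.ofList (PySem.Chars.join "\n".toList
         (((PySem.Chars.split? s.toList "\n".toList).getD []).map (fun l => (pvFA cp l).1)))) := by
  unfold seperate_numeric_annos_and_codelines_py pvSepAnnos
  have h1 : ∀ (acc : List (List Char × Option (List Char))) (line : List Char),
      (if PySem.Chars.isIn "--- py".toList line then
        if PySem.Chars.isIn ("   ".toList ++ (cp.toList ++ " --- py stmt ".toList)) line then
          match (PySem.Chars.split? line ("   ".toList ++ (cp.toList ++ " --- py stmt ".toList))).getD [] with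
          | [code, anno] => acc ++ [(code, some anno)]
          | _ => acc ++ [(line, none)]
        else acc ++ [(line, none)]
      else acc ++ [(line, none)]) = acc ++ [pvFA cp line] := by
    intro acc line
    simp only [pvFA, pvMark, pvSep, List.append_assoc]
    split_ifs with h h' <;> try rfl
    rcases (PySem.Chars.split? line ("   ".toList ++ (cp.toList ++ " --- py stmt ".toList))).getD []
      with _ | ⟨c, _ | ⟨a, _ | _⟩⟩ <;> rfl
  have h2 : ∀ (acc : List (String × Option (List Int))) (la : List Char × Option (List Char)),
      (match la.2 with
        | none => acc ++ [(String.ofList la.1, (none : Option (List Int)))]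
        | some idx => acc ++ [(String.ofList la.1,
            some (((PySem.Chars.split? idx ", py stmt ".toList).getD []).map
              (fun t => (PySem.Int.ofChars? t).getD 0)))]) = acc ++ [pvGA la] := by
    intro acc la
    rcases la with ⟨l, _ | idx⟩ <;> rfl
  simp only [funext (fun acc => funext (h1 acc)), funext (fun acc => funext (h2 acc)),
    PySem.List.foldl_append_singleton_eq_map, List.nil_append, List.map_map]
  rfl

lemma pvB_eq (s cp : String) :
    seperate_numeric_annos_and_codelines_py_alt s cp =
      ((((PySem.Chars.split? s.toList "\n".toList).getD []).map (pvPB cp)),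
       String.ofList (PySem.Chars.join "\n".toList
         (((PySem.Chars.split? s.toList "\n".toList).getD []).map (pvCB cp)))) := by
  unfold seperate_numeric_annos_and_codelines_py_alt
  have h1 : ∀ (acc : List (String × Option (List Int)) × List (List Char)) (line : List Char),
      (if PySem.Chars.isIn ("   ".toList ++ cp.toList ++ " --- py stmt ".toList) line then
        (acc.1 ++ [(String.ofList (((PySem.Chars.split? line ("   ".toList ++ cp.toList ++ " --- py stmt ".toList)).getD []).getD 0 []),
           some ((((PySem.Chars.split? ((((PySem.Chars.split? line ("   ".toList ++ cp.toList ++ " --- py stmt ".toList)).getD []).getD 1 [])) ", py stmt ".toList).getD []).map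
             (fun t => (PySem.Int.ofChars? t).getD 0))))],
         acc.2 ++ [(((PySem.Chars.split? line ("   ".toList ++ cp.toList ++ " --- py stmt ".toList)).getD []).getD 0 [])])
      else (acc.1 ++ [(String.ofList line, (none : Option (List Int)))], acc.2 ++ [line]))
      = (acc.1 ++ [pvPB cp line], acc.2 ++ [pvCB cp line]) := by
    intro acc line
    simp only [pvPB, pvCB, pvParse, pvSep]
    split_ifs <;> rfl
  simp only [funext (fun acc => funext (h1 acc)),
    PySem.List.foldl_prod_mk (f := fun a line => a ++ [pvPB cp line]) (g := fun a line => a ++ [pvCB cp line]),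
    PySem.List.foldl_append_singleton_eq_map, List.nil_append]

lemma pvLine_eq (cp : String) (line : List Char)
    (hp : PySem.Chars.isIn "--- py".toList line = true →
      (PySem.Chars.isIn ("   ".toList ++ cp.toList ++ " --- py stmt ".toList) line = true ∧
       ((PySem.Chars.split? line ("   ".toList ++ cp.toList ++ " --- py stmt ".toList)).getD []).length = 2 ∧
       ∀ t ∈ (PySem.Chars.split?
                (((PySem.Chars.split? line ("   ".toList ++ cp.toList ++ " --- py stmt ".toList)).getD []).getD 1 [])
                ", py stmt ".toList).getD [],
         (PySem.Int.ofChars? t).isSome = true)) :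
    pvGA (pvFA cp line) = pvPB cp line ∧ (pvFA cp line).1 = pvCB cp line := by
  by_cases hm : PySem.Chars.isIn pvMark line = true
  · obtain ⟨hsep, hlen, -⟩ := hp hm
    obtain ⟨c, a, hca⟩ := List.length_eq_two.mp hlen
    simp only [pvFA, pvPB, pvCB, pvGA, pvMark, pvSep] at *
    rw [hm, hsep, hca]
    simp
  · have hsep : ¬ PySem.Chars.isIn (pvSep cp) line = true :=
      fun h => hm (pvMark_of_sep cp line h)
    simp only [pvFA, pvPB, pvCB, pvGA]
    rw [if_neg hm, if_neg hsep, if_neg hsep]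
    exact ⟨rfl, rfl⟩

-- ===== VERDICT (by name: the statement is the Claim_ definition above) =====
theorem seperate_numeric_annos_and_codelines_py_spec : Claim_equal_seperate_numeric_annos_and_codelines_py := by
  intro s cp _ hpre
  unfold Spec_seperate_numeric_annos_and_codelines_py
  rw [pvA_eq, pvB_eq]
  unfold Pre_seperate_numeric_annos_and_codelines_py at hpre
  refine Prod.ext ?_ ?_
  · exact List.map_congr_left (fun l hl => (pvLine_eq cp l (hpre l hl)).1)
  · exact congrArg String.ofList (congrArg (PySem.Chars.join "\n".toList)
      (List.map_congr_left (fun l hl => (pvLine_eq cp l (hpre l hl)).2)))
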